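-- pv_equiv track=rewrite | github.com/jfma-USTC/HRDoc | end2end_system/stage1_data_prepare.py | find_two_column_spliter
-- ===== SOURCE A (Python) =====
-- def find_two_column_spliter(content_lines, page2img_size):
--     spliter = [] # List of [left_space_left_border, left_space_right_border, right_space_left_border, right_space_right_border]
--     for page_id in range(len(content_lines)):
--         boxes = [x[1] for x in content_lines[page_id]] # [x0,y0,x1,y1]
--         page_width = page2img_size[page_id][0]
--         mid_x = page_width/2
--         l_box_ids, r_box_ids = [], []
--         for i in range(len(boxes)):
--             x0, x1 = boxes[i][0], boxes[i][2]
--             if (x1-x0) < page_width/3: # Filter out those short text lines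
--                 continue
--             if x1<page_width/2:
--                 l_box_ids.append(i)
--             if x0>page_width/2:
--                 r_box_ids.append(i)
--         l_l = min([boxes[i][0] for i in l_box_ids]) if len(l_box_ids) != 0 else -1
--         l_r = max([boxes[i][2] for i in l_box_ids]) if len(l_box_ids) != 0 else -1
--         r_l = min([boxes[i][0] for i in r_box_ids]) if len(r_box_ids) != 0 else -1
--         r_r = max([boxes[i][2] for i in r_box_ids]) if len(r_box_ids) != 0 else -1
--         spliter.append([l_l, l_r, r_l, r_r])
--     return spliter
-- ===== SOURCE B (Python) =====
-- def find_two_column_spliter(content_lines, page2img_size):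
--     spliter = []
--     for page_id, lines in enumerate(content_lines):
--         page_width = page2img_size[page_id][0]
--         left = None   # (running min x0, running max x1) of left-column boxes
--         right = None  # same for right-column boxes
--         for _, box in lines:
--             x0, x1 = box[0], box[2]
--             if (x1 - x0) < page_width / 3:  # filter out short text lines
--                 continue
--             if x1 < page_width / 2:
--                 left = (x0, x1) if left is None else (min(left[0], x0), max(left[1], x1))
--             if x0 > page_width / 2:
--                 right = (x0, x1) if right is None else (min(right[0], x0), max(right[1], x1))
--         l_l, l_r = left if left is not None else (-1, -1)
--         r_l, r_r = right if right is not None else (-1, -1)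
--         spliter.append([l_l, l_r, r_l, r_r])
--     return spliter
-- ===== Notes on version B (the rewrite author's own statement) =====
-- stated objective: simpler
-- what changed: A builds two index lists per page and then rescans the boxes with four min/max comprehensions; B makes one fused pass per page keeping two optional running (min x0, max x1) accumulators, so the index lists and the four rescans disappear.
import Mathlib
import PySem

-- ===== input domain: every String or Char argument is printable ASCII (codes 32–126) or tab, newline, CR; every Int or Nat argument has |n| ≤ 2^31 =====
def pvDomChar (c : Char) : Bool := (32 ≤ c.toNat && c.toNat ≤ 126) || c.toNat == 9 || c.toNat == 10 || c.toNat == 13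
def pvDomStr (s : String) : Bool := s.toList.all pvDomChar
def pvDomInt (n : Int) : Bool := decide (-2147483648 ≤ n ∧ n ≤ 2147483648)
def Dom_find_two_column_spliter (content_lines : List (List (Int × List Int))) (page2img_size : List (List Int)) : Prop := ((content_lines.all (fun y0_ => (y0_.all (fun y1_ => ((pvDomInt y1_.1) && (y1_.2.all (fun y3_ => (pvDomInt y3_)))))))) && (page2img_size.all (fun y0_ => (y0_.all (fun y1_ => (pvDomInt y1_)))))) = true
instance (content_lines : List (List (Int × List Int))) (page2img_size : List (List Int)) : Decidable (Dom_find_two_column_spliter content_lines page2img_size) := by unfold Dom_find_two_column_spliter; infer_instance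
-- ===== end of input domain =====

-- B replaces A's build-index-lists-then-rescan structure by one fused pass keeping two
-- optional running (min x0, max x1) accumulators per page (objective: simpler).
-- Float tests like `x1 < page_width/2` are ported as the exact integer tests `2*x1 < page_width`
-- (exact on the |n| ≤ 2^31 domain: both sides of Python's float comparison are exact or
-- separated by ≥ 1/3 while the rounding error is ≪ 2^-20).

-- ===== PORT A =====
def find_two_column_spliter (content_lines : List (List (Int × List Int))) (page2img_size : List (List Int)) : List (List Int) :=
  (PySem.List.pyRange 0 content_lines.length 1).foldl
    (fun spliter page_id =>
      let boxes := (PySem.List.pyGetD content_lines page_id []).map (fun x => x.2)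
      let page_width := PySem.List.pyGetD (PySem.List.pyGetD page2img_size page_id []) 0 0
      let ids := (PySem.List.pyRange 0 boxes.length 1).foldl
        (fun (p : List Int × List Int) i =>
          let box := PySem.List.pyGetD boxes i []
          let x0 := PySem.List.pyGetD box 0 0
          let x1 := PySem.List.pyGetD box 2 0
          if 3 * (x1 - x0) < page_width then p
          else
            ((if 2 * x1 < page_width then p.1 ++ [i] else p.1),
             (if 2 * x0 > page_width then p.2 ++ [i] else p.2)))
        ([], [])
      let l_l := if ids.1.length ≠ 0 then (PySem.List.min? (ids.1.map (fun i => PySem.List.pyGetD (PySem.List.pyGetD boxes i []) 0 0)) (fun x => x)).getD 0 else -1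
      let l_r := if ids.1.length ≠ 0 then (PySem.List.max? (ids.1.map (fun i => PySem.List.pyGetD (PySem.List.pyGetD boxes i []) 2 0)) (fun x => x)).getD 0 else -1
      let r_l := if ids.2.length ≠ 0 then (PySem.List.min? (ids.2.map (fun i => PySem.List.pyGetD (PySem.List.pyGetD boxes i []) 0 0)) (fun x => x)).getD 0 else -1
      let r_r := if ids.2.length ≠ 0 then (PySem.List.max? (ids.2.map (fun i => PySem.List.pyGetD (PySem.List.pyGetD boxes i []) 2 0)) (fun x => x)).getD 0 else -1
      spliter ++ [[l_l, l_r, r_l, r_r]])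
    []

-- ===== PORT B =====
def find_two_column_spliter_alt (content_lines : List (List (Int × List Int))) (page2img_size : List (List Int)) : List (List Int) :=
  (PySem.List.enumerate content_lines 0).foldl
    (fun spliter pr =>
      let page_id := pr.1
      let lines := pr.2
      let page_width := PySem.List.pyGetD (PySem.List.pyGetD page2img_size page_id []) 0 0
      let st := lines.foldl
        (fun (st : Option (Int × Int) × Option (Int × Int)) line =>
          let box := line.2
          let x0 := PySem.List.pyGetD box 0 0
          let x1 := PySem.List.pyGetD box 2 0
          if 3 * (x1 - x0) < page_width then st
          else
            (if 2 * x1 < page_width then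
               some (match st.1 with | none => (x0, x1) | some (a, b) => (min a x0, max b x1))
             else st.1,
             if 2 * x0 > page_width then
               some (match st.2 with | none => (x0, x1) | some (a, b) => (min a x0, max b x1))
             else st.2))
        (none, none)
      let ll := match st.1 with | none => (-1, -1) | some p => p
      let rr := match st.2 with | none => (-1, -1) | some p => p
      spliter ++ [[ll.1, ll.2, rr.1, rr.2]])
    []

-- ===== PRECONDITION & SPEC =====
-- Pre_ excludes exactly the inputs on which Python A raises IndexError: a page list shorter
-- than content_lines or an empty size entry (page2img_size[page_id][0]), or a box list with
-- fewer than 3 entries (boxes[i][2]).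
def Pre_find_two_column_spliter (content_lines : List (List (Int × List Int))) (page2img_size : List (List Int)) : Prop :=
  content_lines.length ≤ page2img_size.length ∧
  (∀ s ∈ page2img_size.take content_lines.length, s ≠ []) ∧
  (∀ lines ∈ content_lines, ∀ line ∈ lines, 3 ≤ line.2.length)
instance (content_lines : List (List (Int × List Int))) (page2img_size : List (List Int)) : Decidable (Pre_find_two_column_spliter content_lines page2img_size) := by unfold Pre_find_two_column_spliter; infer_instance

def pvWitness_find_two_column_spliter : (List (List (Int × List Int))) × List (List Int) :=
  ([[(0, [10, 0, 200, 9]), (1, [300, 10, 480, 19]), (2, [5, 20, 30, 29])]], [[500, 700]])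

def Spec_find_two_column_spliter (content_lines : List (List (Int × List Int))) (page2img_size : List (List Int)) (out : List (List Int)) : Prop := out = find_two_column_spliter_alt content_lines page2img_size
instance (content_lines : List (List (Int × List Int))) (page2img_size : List (List Int)) (out : List (List Int)) : Decidable (Spec_find_two_column_spliter content_lines page2img_size out) := by unfold Spec_find_two_column_spliter; infer_instance

-- ===== CLAIM (what is proved, stated in full; the proofs are below) =====
def Claim_equal_find_two_column_spliter : Prop := ∀ (content_lines : List (List (Int × List Int))) (page2img_size : List (List Int)), Dom_find_two_column_spliter content_lines page2img_size → Pre_find_two_column_spliter content_lines page2img_size → Spec_find_two_column_spliter content_lines page2img_size (find_two_column_spliter content_lines page2img_size)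

-- ===== LEMMAS AND PROOFS =====

def pvX0 (box : List Int) : Int := PySem.List.pyGetD box 0 0
def pvX2 (box : List Int) : Int := PySem.List.pyGetD box 2 0
def pvPL (pw : Int) (box : List Int) : Bool := !decide (3 * (pvX2 box - pvX0 box) < pw) && decide (2 * pvX2 box < pw)
def pvPR (pw : Int) (box : List Int) : Bool := !decide (3 * (pvX2 box - pvX0 box) < pw) && decide (2 * pvX0 box > pw)
def pvG (box : List Int) : Int × Int := (pvX0 box, pvX2 box)
def pvComb (o : Option (Int × Int)) (q : Int × Int) : Option (Int × Int) :=
  some (match o with | none => q | some (a, b) => (min a q.1, max b q.2))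

-- A's index loop builds exactly the two filtered index lists
theorem pv_ids (pw : Int) (boxes : List (List Int)) :
    (PySem.List.pyRange 0 boxes.length 1).foldl
      (fun (p : List Int × List Int) i =>
        let box := PySem.List.pyGetD boxes i []
        let x0 := PySem.List.pyGetD box 0 0
        let x1 := PySem.List.pyGetD box 2 0
        if 3 * (x1 - x0) < pw then p
        else
          ((if 2 * x1 < pw then p.1 ++ [i] else p.1),
           (if 2 * x0 > pw then p.2 ++ [i] else p.2)))
      ([], []) =
    ((PySem.List.pyRange 0 boxes.length 1).filter (fun i => pvPL pw (PySem.List.pyGetD boxes i [])),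
     (PySem.List.pyRange 0 boxes.length 1).filter (fun i => pvPR pw (PySem.List.pyGetD boxes i []))) := by
  rw [PySem.List.foldl_congr_mem _ _
        (fun (p : List Int × List Int) i =>
          ((if pvPL pw (PySem.List.pyGetD boxes i []) then p.1 ++ [i] else p.1),
           (if pvPR pw (PySem.List.pyGetD boxes i []) then p.2 ++ [i] else p.2))) _ ?side]
  case side =>
    intro acc i _
    simp only [pvPL, pvPR, pvX0, pvX2]
    by_cases h : 3 * (PySem.List.pyGetD (PySem.List.pyGetD boxes i []) 2 0 - PySem.List.pyGetD (PySem.List.pyGetD boxes i []) 0 0) < pw <;>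
      simp [h]
  rw [PySem.List.foldl_prod_mk
        (f := fun (acc : List Int) i => if pvPL pw (PySem.List.pyGetD boxes i []) then acc ++ [i] else acc)
        (g := fun (acc : List Int) i => if pvPR pw (PySem.List.pyGetD boxes i []) then acc ++ [i] else acc)]
  rw [PySem.List.foldl_append_if_eq_filter, PySem.List.foldl_append_if_eq_filter]
  simp

-- B's fused loop equals a fold of pvComb over the filtered, projected boxes
theorem pv_st (pw : Int) (lines : List (Int × List Int)) :
    lines.foldl
      (fun (st : Option (Int × Int) × Option (Int × Int)) line =>
        let box := line.2
        let x0 := PySem.List.pyGetD box 0 0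
        let x1 := PySem.List.pyGetD box 2 0
        if 3 * (x1 - x0) < pw then st
        else
          (if 2 * x1 < pw then
             some (match st.1 with | none => (x0, x1) | some (a, b) => (min a x0, max b x1))
           else st.1,
           if 2 * x0 > pw then
             some (match st.2 with | none => (x0, x1) | some (a, b) => (min a x0, max b x1))
           else st.2))
      (none, none) =
    (((lines.filter (fun l => pvPL pw l.2)).map (fun l => pvG l.2)).foldl pvComb none,
     ((lines.filter (fun l => pvPR pw l.2)).map (fun l => pvG l.2)).foldl pvComb none) := by
  rw [PySem.List.foldl_congr_mem _ _
        (fun (st : Option (Int × Int) × Option (Int × Int)) line =>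
          ((if pvPL pw line.2 then pvComb st.1 (pvG line.2) else st.1),
           (if pvPR pw line.2 then pvComb st.2 (pvG line.2) else st.2))) _ ?side]
  case side =>
    intro acc l _
    simp only [pvPL, pvPR, pvX0, pvX2, pvG, pvComb]
    by_cases h : 3 * (PySem.List.pyGetD l.2 2 0 - PySem.List.pyGetD l.2 0 0) < pw <;>
      simp [h]
  rw [PySem.List.foldl_prod_mk
        (fun (acc : Option (Int × Int)) line => if pvPL pw line.2 then pvComb acc (pvG line.2) else acc)
        (fun (acc : Option (Int × Int)) line => if pvPR pw line.2 then pvComb acc (pvG line.2) else acc)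
        lines none none]
  rw [← List.foldl_filter, ← List.foldl_filter, List.foldl_map, List.foldl_map]

theorem pv_foldl_comb (t : List (Int × Int)) (q : Int × Int) :
    t.foldl pvComb (some q) = some ((t.map Prod.fst).foldl min q.1, (t.map Prod.snd).foldl max q.2) := by
  induction t generalizing q with
  | nil => simp
  | cons r t ih => simp [pvComb, ih]

-- pull a map through a range-indexed filter
theorem pv_filter_range {α : Type} (boxes : List (List Int)) (p : List Int → Bool) (F : List Int → α) :
    ((PySem.List.pyRange 0 boxes.length 1).filter (fun i => p (PySem.List.pyGetD boxes i []))).map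
        (fun i => F (PySem.List.pyGetD boxes i [])) =
      (boxes.filter p).map F := by
  have h : ((PySem.List.pyRange 0 boxes.length 1).map (fun i => PySem.List.pyGetD boxes i [])).filter p =
      ((PySem.List.pyRange 0 boxes.length 1).filter (fun i => p (PySem.List.pyGetD boxes i []))).map
        (fun i => PySem.List.pyGetD boxes i []) := by
    rw [List.filter_map]; rfl
  have h2 : (PySem.List.pyRange 0 boxes.length 1).map (fun i => PySem.List.pyGetD boxes i []) = boxes := by
    have := PySem.List.map_pyGetD_pyRange_zero boxes []
    simpa [PySem.List.len_eq] using this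
  calc ((PySem.List.pyRange 0 boxes.length 1).filter (fun i => p (PySem.List.pyGetD boxes i []))).map
        (fun i => F (PySem.List.pyGetD boxes i []))
      = (((PySem.List.pyRange 0 boxes.length 1).filter (fun i => p (PySem.List.pyGetD boxes i []))).map
          (fun i => PySem.List.pyGetD boxes i [])).map F := by rw [List.map_map]; rfl
    _ = (((PySem.List.pyRange 0 boxes.length 1).map (fun i => PySem.List.pyGetD boxes i [])).filter p).map F := by rw [h]
    _ = (boxes.filter p).map F := by rw [h2]

theorem pv_filter_lines {α : Type} (lines : List (Int × List Int)) (p : List Int → Bool) (F : List Int → α) :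
    (lines.filter (fun l => p l.2)).map (fun l => F l.2) =
      ((lines.map (fun x => x.2)).filter p).map F := by
  have h : (lines.map (fun x => x.2)).filter p = (lines.filter (fun l => p l.2)).map (fun x => x.2) := by
    rw [List.filter_map]; rfl
  rw [h, List.map_map]; rfl

-- the per-column output: min/max over the built list = the fused fold's summary
theorem pv_out (ys : List (Int × Int)) :
    ((if ys.length ≠ 0 then (PySem.List.min? (ys.map Prod.fst) (fun x => x)).getD 0 else -1),
     (if ys.length ≠ 0 then (PySem.List.max? (ys.map Prod.snd) (fun x => x)).getD 0 else -1)) =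
    (match ys.foldl pvComb none with | none => (-1, -1) | some p => p) := by
  cases ys with
  | nil => simp
  | cons q t =>
    have h : pvComb none q = some q := rfl
    simp only [List.foldl_cons, h, pv_foldl_comb, List.map_cons,
      PySem.List.min?_id_cons, PySem.List.max?_id_cons, List.length_cons]
    simp

-- the whole per-page body
theorem pv_page (lines : List (Int × List Int)) (pw : Int) :
    (let boxes := lines.map (fun x => x.2)
     let ids := (PySem.List.pyRange 0 boxes.length 1).foldl
        (fun (p : List Int × List Int) i =>
          let box := PySem.List.pyGetD boxes i []
          let x0 := PySem.List.pyGetD box 0 0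
          let x1 := PySem.List.pyGetD box 2 0
          if 3 * (x1 - x0) < pw then p
          else
            ((if 2 * x1 < pw then p.1 ++ [i] else p.1),
             (if 2 * x0 > pw then p.2 ++ [i] else p.2)))
        ([], [])
     let l_l := if ids.1.length ≠ 0 then (PySem.List.min? (ids.1.map (fun i => PySem.List.pyGetD (PySem.List.pyGetD boxes i []) 0 0)) (fun x => x)).getD 0 else -1
     let l_r := if ids.1.length ≠ 0 then (PySem.List.max? (ids.1.map (fun i => PySem.List.pyGetD (PySem.List.pyGetD boxes i []) 2 0)) (fun x => x)).getD 0 else -1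
     let r_l := if ids.2.length ≠ 0 then (PySem.List.min? (ids.2.map (fun i => PySem.List.pyGetD (PySem.List.pyGetD boxes i []) 0 0)) (fun x => x)).getD 0 else -1
     let r_r := if ids.2.length ≠ 0 then (PySem.List.max? (ids.2.map (fun i => PySem.List.pyGetD (PySem.List.pyGetD boxes i []) 2 0)) (fun x => x)).getD 0 else -1
     [l_l, l_r, r_l, r_r]) =
    (let st := lines.foldl
        (fun (st : Option (Int × Int) × Option (Int × Int)) line =>
          let box := line.2
          let x0 := PySem.List.pyGetD box 0 0
          let x1 := PySem.List.pyGetD box 2 0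
          if 3 * (x1 - x0) < pw then st
          else
            (if 2 * x1 < pw then
               some (match st.1 with | none => (x0, x1) | some (a, b) => (min a x0, max b x1))
             else st.1,
             if 2 * x0 > pw then
               some (match st.2 with | none => (x0, x1) | some (a, b) => (min a x0, max b x1))
             else st.2))
        (none, none)
     let ll := match st.1 with | none => (-1, -1) | some p => p
     let rr := match st.2 with | none => (-1, -1) | some p => p
     [ll.1, ll.2, rr.1, rr.2]) := by
  simp only [pv_ids, pv_st]
  have e0 := pv_filter_range (lines.map (fun x => x.2)) (pvPL pw) (fun box => PySem.List.pyGetD box 0 0)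
  have e2 := pv_filter_range (lines.map (fun x => x.2)) (pvPL pw) (fun box => PySem.List.pyGetD box 2 0)
  have f0 := pv_filter_range (lines.map (fun x => x.2)) (pvPR pw) (fun box => PySem.List.pyGetD box 0 0)
  have f2 := pv_filter_range (lines.map (fun x => x.2)) (pvPR pw) (fun box => PySem.List.pyGetD box 2 0)
  have elen := pv_filter_range (lines.map (fun x => x.2)) (pvPL pw) (fun box => box)
  have flen := pv_filter_range (lines.map (fun x => x.2)) (pvPR pw) (fun box => box)
  have gL := pv_filter_lines lines (pvPL pw) pvG
  have gR := pv_filter_lines lines (pvPR pw) pvG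
  have hL := pv_out (((lines.map (fun x => x.2)).filter (pvPL pw)).map pvG)
  have hR := pv_out (((lines.map (fun x => x.2)).filter (pvPR pw)).map pvG)
  rw [gL, gR]
  have elen' := congrArg List.length elen
  have flen' := congrArg List.length flen
  simp only [List.length_map] at e0 e2 f0 f2 elen' flen'
  simp only [List.map_map, List.length_map] at hL hR
  have cf : (Prod.fst ∘ pvG) = fun box => PySem.List.pyGetD box 0 0 := rfl
  have cs : (Prod.snd ∘ pvG) = fun box => PySem.List.pyGetD box 2 0 := rfl
  rw [cf, cs] at hL
  rw [cf, cs] at hR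
  have hL1 := congrArg Prod.fst hL
  have hL2 := congrArg Prod.snd hL
  have hR1 := congrArg Prod.fst hR
  have hR2 := congrArg Prod.snd hR
  dsimp only at hL1 hL2 hR1 hR2
  simp only [e0, e2, f0, f2, List.length_map, elen', flen']
  rw [hL1, hL2, hR1, hR2]

theorem pv_main (content_lines : List (List (Int × List Int))) (page2img_size : List (List Int)) :
    find_two_column_spliter content_lines page2img_size = find_two_column_spliter_alt content_lines page2img_size := by
  unfold find_two_column_spliter find_two_column_spliter_alt
  rw [PySem.List.enumerate_eq_map_pyRange content_lines [], List.foldl_map]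
  rw [PySem.List.foldl_append_singleton_eq_map, PySem.List.foldl_append_singleton_eq_map]
  simp only [List.nil_append, PySem.List.len_eq]
  apply List.map_congr_left
  intro j _
  exact pv_page (PySem.List.pyGetD content_lines j []) (PySem.List.pyGetD (PySem.List.pyGetD page2img_size j []) 0 0)

-- ===== VERDICT (by name: the statement is the Claim_ definition above) =====
theorem find_two_column_spliter_spec : Claim_equal_find_two_column_spliter := by
  intro content_lines page2img_size _ _
  unfold Spec_find_two_column_spliter
  exact pv_main content_lines page2img_size
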